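-- pv_equiv track=rewrite | github.com/reshmaqjs/Tunealigner2 | MainProject/app/SequenceAligner.py | Make_DiffList
-- ===== SOURCE A (Python) =====
-- def Make_DiffList(inc,dec,seq):
--     list_of_lists=[seq]
--     temp1=seq
--     temp2=seq
--     for i in range(inc):
--         print (i)
--         temp1=[ [j[0],str(int(j[1])+1),j[2]] for j in temp1]
--         list_of_lists.append(temp1)
--     for i in range(dec):
--         temp2=[ [j[0],str(int(j[1])-1),j[2]] for j in temp2]
--         list_of_lists.append(temp2)
--     return list_of_lists
-- ===== SOURCE B (Python) =====
-- def Make_DiffList(inc, dec, seq):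
--     # row-major decomposition: build each row's own chain of shifted copies,
--     # then transpose the chains into per-offset lists; prints kept from A.
--     for i in range(inc):
--         print(i)
--
--     def chain(row, delta, n):
--         out = []
--         for _ in range(n):
--             row = [row[0], str(int(row[1]) + delta), row[2]]
--             out.append(row)
--         return out
--
--     up = [chain(row, 1, inc) for row in seq]
--     down = [chain(row, -1, dec) for row in seq]
--     result = [seq]
--     result += [[r[k] for r in up] for k in range(inc)]
--     result += [[r[k] for r in down] for k in range(dec)]
--     return result
-- ===== Notes on version B (the rewrite author's own statement) =====
-- stated objective: alternative
-- what changed: A builds the output level by level, each whole level derived from the previous one through two accumulator chains; B inverts the traversal: it builds an independent shifted chain per ROW and then transposes the row chains into the per-offset lists, with no level-to-level accumulator.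
import Mathlib
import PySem

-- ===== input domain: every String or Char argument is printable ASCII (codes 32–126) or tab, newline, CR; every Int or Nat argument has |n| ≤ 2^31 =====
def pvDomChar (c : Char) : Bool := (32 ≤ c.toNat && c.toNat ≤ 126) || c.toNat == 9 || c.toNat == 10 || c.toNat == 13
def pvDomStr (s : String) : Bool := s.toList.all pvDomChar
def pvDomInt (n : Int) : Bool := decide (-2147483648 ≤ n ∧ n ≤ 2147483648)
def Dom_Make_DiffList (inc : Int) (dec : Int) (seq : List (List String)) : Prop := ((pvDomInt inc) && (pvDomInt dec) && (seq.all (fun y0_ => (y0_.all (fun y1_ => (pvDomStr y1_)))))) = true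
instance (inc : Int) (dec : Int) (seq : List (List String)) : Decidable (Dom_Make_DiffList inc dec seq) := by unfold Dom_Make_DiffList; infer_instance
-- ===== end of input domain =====

-- B replaces A's level-by-level accumulator chains by independent per-row chains that are
-- then transposed into the per-offset lists (alternative decomposition, same cost).
-- A's print(i) side effect is reproduced in the Python B; the equivalence proved here is
-- about the return value.

-- ===== PORT A =====
-- [j[0], str(int(j[1]) + d), j[2]]  (total form; Pre_ excludes the inputs where Python raises)
def pvRowA (d : Int) (j : List String) : List String :=
  [PySem.List.pyGetD j 0 "",
   PySem.Int.toStr ((PySem.Int.ofStr? (PySem.List.pyGetD j 1 "")).getD 0 + d),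
   PySem.List.pyGetD j 2 ""]

def Make_DiffList (inc : Int) (dec : Int) (seq : List (List String)) : List (List (List String)) :=
  -- list_of_lists = [seq]; temp1 = seq; for i in range(inc): temp1 = [...]; append
  let st1 := (PySem.List.pyRange 0 inc 1).foldl
    (fun (st : List (List (List String)) × List (List String)) _ =>
      let t := st.2.map (pvRowA 1)
      (st.1 ++ [t], t)) ([seq], seq)
  -- temp2 = seq; for i in range(dec): temp2 = [...]; append
  let st2 := (PySem.List.pyRange 0 dec 1).foldl
    (fun (st : List (List (List String)) × List (List String)) _ =>
      let t := st.2.map (pvRowA (-1))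
      (st.1 ++ [t], t)) (st1.1, seq)
  st2.1

-- ===== PORT B =====
-- chain(row, d, n): the row's own shifted copies, one per step
def pvChain (d : Int) (n : Int) (row : List String) : List (List String) :=
  ((PySem.List.pyRange 0 n 1).foldl
    (fun (st : List (List String) × List String) _ =>
      let r := pvRowA d st.2
      (st.1 ++ [r], r)) ([], row)).1

def Make_DiffList_alt (inc : Int) (dec : Int) (seq : List (List String)) : List (List (List String)) :=
  let up := seq.map (pvChain 1 inc)
  let down := seq.map (pvChain (-1) dec)
  ([seq] ++ (PySem.List.pyRange 0 inc 1).map (fun k => up.map (fun r => PySem.List.pyGetD r k [])))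
    ++ (PySem.List.pyRange 0 dec 1).map (fun k => down.map (fun r => PySem.List.pyGetD r k []))

-- ===== PRECONDITION & SPEC =====
-- Pre_ excludes exactly the inputs where Python A raises: when at least one loop runs
-- (0 < inc or 0 < dec), every row needs indices 0..2 (IndexError) and an int()-parsable
-- middle field (ValueError).
def Pre_Make_DiffList (inc : Int) (dec : Int) (seq : List (List String)) : Prop :=
  (0 < inc ∨ 0 < dec) →
    ∀ row ∈ seq, 3 ≤ row.length ∧ (PySem.Int.ofStr? (PySem.List.pyGetD row 1 "")).isSome = true
instance (inc : Int) (dec : Int) (seq : List (List String)) : Decidable (Pre_Make_DiffList inc dec seq) := by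
  unfold Pre_Make_DiffList; infer_instance
def pvWitness_Make_DiffList : Int × Int × List (List String) := (2, 1, [["a", "5", "b"], ["c", "-7", "d"]])

def Spec_Make_DiffList (inc : Int) (dec : Int) (seq : List (List String)) (out : List (List (List String))) : Prop := out = Make_DiffList_alt inc dec seq
instance (inc : Int) (dec : Int) (seq : List (List String)) (out : List (List (List String))) : Decidable (Spec_Make_DiffList inc dec seq out) := by unfold Spec_Make_DiffList; infer_instance

-- ===== CLAIM (what is proved, stated in full; the proofs are below) =====
def Claim_equal_Make_DiffList : Prop := ∀ (inc : Int) (dec : Int) (seq : List (List String)), Dom_Make_DiffList inc dec seq → Pre_Make_DiffList inc dec seq → Spec_Make_DiffList inc dec seq (Make_DiffList inc dec seq)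

-- ===== LEMMAS AND PROOFS =====

-- closed form of A's loop body iterated n times
theorem iterA (d : Int) (L : List (List (List String))) (t : List (List String)) (n : Nat) :
    (fun (st : List (List (List String)) × List (List String)) =>
        let t' := st.2.map (pvRowA d); (st.1 ++ [t'], t'))^[n] (L, t)
      = (L ++ (List.range n).map (fun k => t.map ((pvRowA d)^[k + 1])), t.map ((pvRowA d)^[n])) := by
  induction n with
  | zero => simp
  | succ m ih =>
      rw [Function.iterate_succ_apply', ih]
      simp only [List.range_succ, List.map_append, List.map_map, List.append_assoc,
        List.map_cons, List.map_nil, ← Function.iterate_succ']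

-- closed form of B's chain loop iterated n times
theorem iterB (d : Int) (o : List (List String)) (r : List String) (n : Nat) :
    (fun (st : List (List String) × List String) =>
        let r' := pvRowA d st.2; (st.1 ++ [r'], r'))^[n] (o, r)
      = (o ++ (List.range n).map (fun k => (pvRowA d)^[k + 1] r), (pvRowA d)^[n] r) := by
  induction n with
  | zero => simp
  | succ m ih =>
      rw [Function.iterate_succ_apply', ih]
      simp only [List.range_succ, List.map_append, List.append_assoc, List.map_cons, List.map_nil,
        ← Function.iterate_succ_apply']

-- B's chain as a closed form
theorem pvChain_eq (d : Int) (n : Int) (row : List String) :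
    pvChain d n row = (List.range n.toNat).map (fun k => (pvRowA d)^[k + 1] row) := by
  unfold pvChain
  rw [List.foldl_const (fun (st : List (List String) × List String) =>
        let r' := pvRowA d st.2; (st.1 ++ [r'], r')) ([], row)]
  rw [PySem.List.length_pyRange_one, iterB]
  simp

-- one transposed level of B equals one evolved level of A
theorem level_eq (d : Int) (n : Int) (seq : List (List String)) (k : Nat) (hk : k < n.toNat) :
    seq.map (fun row => PySem.List.pyGetD (pvChain d n row) (k : Int) []) =
      seq.map ((pvRowA d)^[k + 1]) := by
  simp only [PySem.List.pyGetD_natCast, pvChain_eq]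
  exact List.map_congr_left fun row _ => PySem.List.getD_map_range _ _ _ _ hk

-- ===== VERDICT (by name: the statement is the Claim_ definition above) =====
theorem Make_DiffList_spec : Claim_equal_Make_DiffList := by
  intro inc dec seq _ _
  unfold Spec_Make_DiffList Make_DiffList Make_DiffList_alt
  have hA : ∀ (d : Int) (l : List Int) (L : List (List (List String))) (t : List (List String)),
      List.foldl (fun (st : List (List (List String)) × List (List String)) (_ : Int) =>
          let t' := st.2.map (pvRowA d); (st.1 ++ [t'], t')) (L, t) l
        = (L ++ (List.range l.length).map (fun k => t.map ((pvRowA d)^[k + 1])),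
           t.map ((pvRowA d)^[l.length])) := by
    intro d l L t
    rw [List.foldl_const]
    exact iterA d L t l.length
  simp only [hA, PySem.List.length_pyRange_one, Int.sub_zero]
  rw [PySem.List.pyRange_one 0 inc, PySem.List.pyRange_one 0 dec]
  simp only [List.map_map, Function.comp_def, Int.zero_add, Int.sub_zero, List.append_assoc]
  congr 1
  congr 1
  · refine List.map_congr_left fun k hk => ?_
    exact (level_eq 1 inc seq k (List.mem_range.mp hk)).symm
  · refine List.map_congr_left fun k hk => ?_
    exact (level_eq (-1) dec seq k (List.mem_range.mp hk)).symm
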